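-- pv_equiv track=rewrite | github.com/jeno8522/Coding-Test-Study | 9월/2주차/프로그래머스/k진수에서 소수 개수 구하기.py | solution
-- ===== SOURCE A (Python) =====
-- def transform_radix(n: int, k: int):    #진수 변환
--     res = 0
--     i = 1
--     while n > 0:
--         res += n % k * i
--         i *= 10
--         n //= k
--     return res
--
-- def solution(n, k):
--     answer = -1
--     cnt = 0
--
--     radix = transform_radix(n,k)
--
--     for e in str(radix).split('0'):     #진수 변환된 수를 str로 바꾸고 '0'을 기준으로 split
--         if e.isdigit():                 #문자열이 숫자로만 이루어져 있는지 체크 (끝이 0인경우 ''가 남음)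
--                 cnt += 1
--
--     answer = cnt
--
--
--     return answer
-- ===== SOURCE B (Python) =====
-- def transform_radix(n: int, k: int):    # identical packing helper, kept as in A
--     res = 0
--     i = 1
--     while n > 0:
--         res += n % k * i
--         i *= 10
--         n //= k
--     return res
--
-- def solution(n, k):
--     radix = transform_radix(n, k)
--     cnt = 0
--     in_run = False
--     while radix > 0:
--         if radix % 10 != 0:
--             if not in_run:
--                 cnt += 1
--                 in_run = True
--         else:
--             in_run = False
--         radix //= 10
--     return cnt
-- ===== Notes on version B (the rewrite author's own statement) =====
-- stated objective: alternative
-- what changed: B keeps transform_radix but counts the maximal runs of nonzero decimal digits arithmetically (radix % 10, radix //= 10, in-run flag) instead of A's str(radix).split('0') with isdigit checks; Pre_ restricts to the task's natural domain k >= 2 (or n <= 0): for n > 0, k = 0 raises, k = 1 diverges, and a negative base is malformed input on which A's string count of the negative packed value is accidental.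
-- outside the precondition, e.g. on solution(95, -200): A returns 1, B returns 0
import Mathlib
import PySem

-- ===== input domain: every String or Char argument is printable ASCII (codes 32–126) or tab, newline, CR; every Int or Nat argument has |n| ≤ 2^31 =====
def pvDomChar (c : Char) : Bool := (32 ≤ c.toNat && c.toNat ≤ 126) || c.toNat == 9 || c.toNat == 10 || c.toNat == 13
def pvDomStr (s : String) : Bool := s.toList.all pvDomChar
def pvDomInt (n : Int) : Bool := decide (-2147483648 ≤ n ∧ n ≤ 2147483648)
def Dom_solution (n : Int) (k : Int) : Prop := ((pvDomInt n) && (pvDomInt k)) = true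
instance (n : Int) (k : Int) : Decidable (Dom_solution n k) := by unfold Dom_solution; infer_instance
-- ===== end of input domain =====

-- B replaces A's str(radix).split('0') segment counting by an arithmetic scan of the
-- decimal digits (radix % 10, radix //= 10) with an in-run flag; same return values.

-- ===== PORT A =====
-- shared helper: both Pythons define the identical transform_radix (fuel makes the
-- while-loop total; inside Pre_ the loop runs at most n.toNat times, so fuel never runs out)
def transformGo (fuel : Nat) (n k res i : Int) : Int :=
  match fuel with
  | 0 => res
  | fuel + 1 =>
    if 0 < n then
      transformGo fuel (PySem.Int.floordiv n k) k (res + PySem.Int.mod n k * i) (i * 10)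
    else res

def transformRadix (n k : Int) : Int := transformGo (n.toNat + 1) n k 0 1

-- A: str(radix).split('0'), count the segments that are pure digits (A's dead 'answer = -1' dropped)
def solution (n : Int) (k : Int) : Int :=
  let radix := transformRadix n k
  let parts := (PySem.Str.split? (PySem.Int.toStr radix) "0").getD []
  parts.foldl (fun cnt e => if PySem.Str.strIsdigit e then cnt + 1 else cnt) 0

-- ===== PORT B =====
-- B: while radix > 0: look at radix % 10, track an in-run flag, radix //= 10
def runLoop (radix cnt : Int) (inRun : Bool) : Int :=
  if h : 0 < radix then
    if PySem.Int.mod radix 10 ≠ 0 then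
      runLoop (PySem.Int.floordiv radix 10) (if inRun then cnt else cnt + 1) true
    else
      runLoop (PySem.Int.floordiv radix 10) cnt false
  else cnt
termination_by radix.toNat
decreasing_by
  all_goals
    rw [PySem.Int.floordiv_eq_ediv_of_pos (by norm_num)]
    omega

def solution_alt (n : Int) (k : Int) : Int :=
  runLoop (transformRadix n k) 0 false

-- ===== PRECONDITION & SPEC =====
-- Pre_ restricts to the natural domain of a base-k conversion: k ≥ 2 (or n ≤ 0, where the
-- loop never runs). For n > 0 a base k ≤ 1 is malformed input: k = 0 raises ZeroDivisionError,
-- k = 1 loops forever, and k < 0 packs a negative value, where A's count over the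
-- minus-sign-bearing decimal string is an accident of str() that B's digit loop does not follow.
def Pre_solution (n : Int) (k : Int) : Prop := n ≤ 0 ∨ 2 ≤ k
instance (n : Int) (k : Int) : Decidable (Pre_solution n k) := by unfold Pre_solution; infer_instance
def pvWitness_solution : Int × Int := (9, 2)
def Spec_solution (n : Int) (k : Int) (out : Int) : Prop := out = solution_alt n k
instance (n : Int) (k : Int) (out : Int) : Decidable (Spec_solution n k out) := by unfold Spec_solution; infer_instance

-- ===== CLAIM (what is proved, stated in full; the proofs are below) =====
def Claim_equal_solution : Prop := ∀ (n : Int) (k : Int), Dom_solution n k → Pre_solution n k → Spec_solution n k (solution n k)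

-- ===== LEMMAS AND PROOFS =====

-- run count of a char list, scanned front to back with an in-run flag
def runsF : List Char → Bool → Int
  | [], _ => 0
  | c :: cs, b => if c ≠ '0' then (if b then 0 else 1) + runsF cs true else runsF cs false

-- run count of the decimal digits of a natural number, low digit first
def runsG (m : Nat) (b : Bool) : Int :=
  if h : m = 0 then 0
  else if m % 10 ≠ 0 then (if b then 0 else 1) + runsG (m / 10) true else runsG (m / 10) false
termination_by m
decreasing_by all_goals exact Nat.div_lt_self (Nat.pos_of_ne_zero h) (by norm_num)

-- structural model of s.split('0')
def mySplit : List Char → List (List Char)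
  | [] => [[]]
  | c :: cs => if c = '0' then [] :: mySplit cs else (mySplit cs).modifyHead (c :: ·)

-- whether a char list starts with a non-'0' char
def headNZ : List Char → Bool
  | [] => false
  | c :: _ => decide (c ≠ '0')

-- the in-run state after scanning a char list
def endSt : List Char → Bool → Bool
  | [], b => b
  | c :: cs, _ => endSt cs (decide (c ≠ '0'))

theorem mySplit_ne_nil (cs : List Char) : mySplit cs ≠ [] := by
  induction cs with
  | nil => simp [mySplit]
  | cons c cs ih =>
    simp only [mySplit]
    split
    · simp
    · cases h : mySplit cs with
      | nil => exact absurd h ih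
      | cons a t => simp [List.modifyHead]

theorem go_spec (fuel : Nat) : ∀ (l cur : List Char) (acc : List (List Char)),
    l.length < fuel →
    PySem.Chars.splitOn.go ['0'] fuel l cur acc
      = acc.reverse ++ (mySplit l).modifyHead (fun x => cur.reverse ++ x) := by
  induction fuel with
  | zero => intro l cur acc h; omega
  | succ fuel ih =>
    intro l cur acc h
    cases l with
    | nil =>
      simp [PySem.Chars.splitOn.go, mySplit, List.modifyHead]
    | cons c rest =>
      by_cases hc : c = '0'
      · subst hc
        rw [show PySem.Chars.splitOn.go ['0'] (fuel+1) ('0' :: rest) cur acc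
              = PySem.Chars.splitOn.go ['0'] fuel rest [] (cur.reverse :: acc) from by
            simp [PySem.Chars.splitOn.go, List.isPrefixOf]]
        rw [ih rest [] (cur.reverse :: acc) (by simpa using Nat.lt_of_succ_lt_succ h)]
        cases hms : mySplit rest with
        | nil => exact absurd hms (mySplit_ne_nil rest)
        | cons a t => simp [mySplit, hms, List.modifyHead]
      · rw [show PySem.Chars.splitOn.go ['0'] (fuel+1) (c :: rest) cur acc
              = PySem.Chars.splitOn.go ['0'] fuel rest (c :: cur) acc from by
            simp [PySem.Chars.splitOn.go, List.isPrefixOf, Ne.symm hc]]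
        rw [ih rest (c :: cur) acc (by simpa using Nat.lt_of_succ_lt_succ h)]
        cases hms : mySplit rest with
        | nil => exact absurd hms (mySplit_ne_nil rest)
        | cons a t => simp [mySplit, hms, hc, List.modifyHead]

theorem splitOn_eq_mySplit (cs : List Char) :
    PySem.Chars.splitOn cs ['0'] = mySplit cs := by
  rw [PySem.Chars.splitOn, go_spec (cs.length + 1) cs [] [] (by omega)]
  cases hms : mySplit cs with
  | nil => exact absurd hms (mySplit_ne_nil cs)
  | cons a t => simp [List.modifyHead]

theorem runsF_state (cs : List Char) :
    runsF cs true = runsF cs false - (if headNZ cs then 1 else 0) := by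
  cases cs with
  | nil => simp [runsF, headNZ]
  | cons c cs =>
    by_cases h : c = '0' <;> simp [runsF, headNZ, h]

theorem mySplit_headI_isEmpty (cs : List Char) :
    (mySplit cs).headI.isEmpty = !headNZ cs := by
  cases cs with
  | nil => simp [mySplit, headNZ]
  | cons c cs =>
    by_cases h : c = '0'
    · simp [mySplit, headNZ, h]
    · cases hms : mySplit cs with
      | nil => exact absurd hms (mySplit_ne_nil cs)
      | cons a t => simp [mySplit, headNZ, h, hms, List.modifyHead]

theorem countNE_mySplit (cs : List Char) :
    ((mySplit cs).countP (fun e => !e.isEmpty) : Int) = runsF cs false := by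
  induction cs with
  | nil => simp [mySplit, runsF]
  | cons c cs ih =>
    by_cases h : c = '0'
    · simp [mySplit, runsF, h, ih]
    · have hstate := runsF_state cs
      have hhead := mySplit_headI_isEmpty cs
      cases hms : mySplit cs with
      | nil => exact absurd hms (mySplit_ne_nil cs)
      | cons a t =>
        rw [hms] at hhead ih
        simp only [List.headI] at hhead
        rw [List.countP_cons] at ih
        have hgoal : ((mySplit (c :: cs)).countP (fun e => !e.isEmpty) : Int)
            = 1 + (t.countP (fun e => !e.isEmpty) : Int) := by
          simp [mySplit, h, hms, List.modifyHead, add_comm]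
        rw [hgoal]
        have hF : runsF (c :: cs) false = 1 + runsF cs true := by simp [runsF, h]
        rw [hF, hstate]
        by_cases ha : a.isEmpty = true
        · have hz : headNZ cs = false := by
            cases hz : headNZ cs
            · rfl
            · rw [hz] at hhead; rw [ha] at hhead; simp at hhead
          rw [ha] at ih; simp at ih
          rw [hz]
          simp only [Bool.false_eq_true, if_false]
          omega
        · have ha' : a.isEmpty = false := by simpa using ha
          have hz : headNZ cs = true := by
            cases hz : headNZ cs
            · rw [hz] at hhead; rw [ha'] at hhead; simp at hhead
            · rfl
          rw [ha'] at ih; simp at ih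
          rw [hz]
          simp only [if_true]
          omega

theorem runsF_append (xs : List Char) : ∀ (b : Bool) (c : Char),
    runsF (xs ++ [c]) b
      = runsF xs b + (if c ≠ '0' ∧ endSt xs b = false then 1 else 0) := by
  induction xs with
  | nil =>
    intro b c
    by_cases hc : c = '0' <;> cases b <;> simp [runsF, endSt, hc]
  | cons x xs ih =>
    intro b c
    by_cases hx : x = '0'
    · simp [runsF, endSt, hx, ih]
    · simp [runsF, endSt, hx, ih, add_assoc]

theorem endSt_getLast? (xs : List Char) : ∀ b,
    endSt xs b = match xs.getLast? with | none => b | some c => decide (c ≠ '0') := by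
  induction xs with
  | nil => intro b; simp [endSt]
  | cons x xs ih =>
    intro b
    simp only [endSt, ih]
    cases xs with
    | nil => simp
    | cons y ys =>
      rw [List.getLast?_cons_cons]
      cases h : (y :: ys).getLast? with
      | none => simp at h
      | some c => rfl

theorem runsG_unfold (m : Nat) (h : m ≠ 0) (b : Bool) :
    runsG m b = if m % 10 ≠ 0 then (if b then 0 else 1) + runsG (m / 10) true
                else runsG (m / 10) false := by
  rw [runsG]; simp [h]

theorem runsG_state (m : Nat) :
    runsG m true = runsG m false - (if m % 10 ≠ 0 ∧ m ≠ 0 then 1 else 0) := by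
  by_cases h : m = 0
  · simp [h, runsG]
  · rw [runsG_unfold m h true, runsG_unfold m h false]
    split_ifs <;> (simp_all; try omega)

theorem getLast?_toDigits (q : Nat) :
    (Nat.toDigits 10 q).getLast? = some (Nat.digitChar (q % 10)) := by
  rw [Nat.toDigits_eq_if (by norm_num)]
  by_cases h : q < 10
  · rw [if_pos h, Nat.mod_eq_of_lt h]; rfl
  · rw [if_neg h, List.getLast?_concat]

theorem digitChar_eq_zero_iff (d : Nat) (h : d < 10) : Nat.digitChar d = '0' ↔ d = 0 := by
  interval_cases d <;> simp [Nat.digitChar]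

theorem runsF_toDigits (m : Nat) : runsF (Nat.toDigits 10 m) false = runsG m false := by
  induction m using Nat.strong_induction_on with
  | _ m ih =>
    by_cases hm : m < 10
    · rw [Nat.toDigits_of_lt_base hm]
      by_cases h0 : m = 0
      · subst h0; simp [runsF, runsG, Nat.digitChar]
      · have hne : Nat.digitChar m ≠ '0' := by
          rw [ne_eq, digitChar_eq_zero_iff m hm]; exact h0
        rw [runsG, dif_neg h0]
        rw [if_pos (by omega)]
        have h10 : m / 10 = 0 := Nat.div_eq_of_lt hm
        rw [h10]
        simp [runsF, runsG, hne]
    · rw [Nat.toDigits_eq_if (by norm_num), if_neg hm]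
      rw [runsF_append]
      have hq1 : 1 ≤ m / 10 := Nat.le_div_iff_mul_le (by norm_num) |>.mpr (by omega)
      have hih := ih (m / 10) (Nat.div_lt_self (by omega) (by norm_num))
      rw [hih]
      have hend : endSt (Nat.toDigits 10 (m / 10)) false
          = decide (Nat.digitChar (m / 10 % 10) ≠ '0') := by
        rw [endSt_getLast? _ false, getLast?_toDigits]
      have hdlt : m % 10 < 10 := Nat.mod_lt _ (by norm_num)
      have hdlt2 : m / 10 % 10 < 10 := Nat.mod_lt _ (by norm_num)
      have hGs := runsG_state (m / 10)
      rw [runsG_unfold m (by omega) false]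
      by_cases hd : m % 10 = 0
      · have hzc : (m % 10).digitChar = '0' := by rw [hd]; rfl
        rw [if_neg (by simp [hzc]), if_neg (by simp [hd])]
        omega
      · have hc : (m % 10).digitChar ≠ '0' := by
          rw [ne_eq, digitChar_eq_zero_iff _ hdlt]; exact hd
        rw [if_pos hd, hGs]
        by_cases ht : m / 10 % 10 = 0
        · have hzc : (m / 10 % 10).digitChar = '0' := by rw [ht]; rfl
          rw [if_pos ⟨hc, by simp [hend, hzc]⟩]
          rw [if_neg (show ¬(m / 10 % 10 ≠ 0 ∧ m / 10 ≠ 0) by simp [ht])]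
          simp only [Bool.false_eq_true, if_false]
          omega
        · have hc2 : (m / 10 % 10).digitChar ≠ '0' := by
            rw [ne_eq, digitChar_eq_zero_iff _ hdlt2]; exact ht
          rw [if_neg (by simp [hend, hc2])]
          rw [if_pos (show m / 10 % 10 ≠ 0 ∧ m / 10 ≠ 0 from ⟨ht, by omega⟩)]
          simp only [Bool.false_eq_true, if_false]
          omega

theorem runLoop_eq (m : Nat) : ∀ (cnt : Int) (inRun : Bool),
    runLoop (m : Int) cnt inRun = cnt + runsG m inRun := by
  induction m using Nat.strong_induction_on with
  | _ m ih =>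
    intro cnt inRun
    by_cases h0 : m = 0
    · subst h0
      rw [runLoop, runsG]
      simp
    · rw [runLoop, runsG_unfold m h0 inRun]
      have hpos : (0 : Int) < (m : Int) := by exact_mod_cast Nat.pos_of_ne_zero h0
      rw [dif_pos hpos]
      have hmod : PySem.Int.mod (m : Int) 10 = ((m % 10 : Nat) : Int) := by
        exact_mod_cast PySem.Int.mod_natCast m 10
      have hdiv : PySem.Int.floordiv (m : Int) 10 = ((m / 10 : Nat) : Int) := by
        exact_mod_cast PySem.Int.floordiv_natCast m 10
      rw [hmod, hdiv]
      have hrec := ih (m / 10) (Nat.div_lt_self (Nat.pos_of_ne_zero h0) (by norm_num))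
      by_cases hd : m % 10 = 0
      · rw [if_neg (by simp [hd]), if_neg (by simp [hd]), hrec]
      · rw [if_pos (by exact_mod_cast hd), if_pos hd, hrec]
        cases inRun <;> (simp; try ring)

theorem foldl_if_count {α : Type} (p : α → Bool) (l : List α) (a : Int) :
    l.foldl (fun cnt e => if p e then cnt + 1 else cnt) a = a + (l.countP p : Int) := by
  induction l generalizing a with
  | nil => simp
  | cons x l ih => by_cases h : p x <;> (simp [h, ih]; try ring)

theorem mem_mySplit (cs : List Char) : ∀ p ∈ mySplit cs, ∀ x ∈ p, x ∈ cs := by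
  induction cs with
  | nil =>
    intro p hp x hx
    simp only [mySplit, List.mem_singleton] at hp
    subst hp
    simp at hx
  | cons c cs ih =>
    intro p hp x hx
    by_cases h : c = '0'
    · simp only [mySplit, if_pos h] at hp
      rcases List.mem_cons.mp hp with hp | hp
      · subst hp; simp at hx
      · exact List.mem_cons_of_mem _ (ih p hp x hx)
    · simp only [mySplit, if_neg h] at hp
      cases hms : mySplit cs with
      | nil => exact absurd hms (mySplit_ne_nil cs)
      | cons a t =>
        rw [hms] at hp
        simp only [List.modifyHead] at hp
        rcases List.mem_cons.mp hp with hp | hp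
        · subst hp
          rcases List.mem_cons.mp hx with hx | hx
          · subst hx; exact List.mem_cons_self
          · exact List.mem_cons_of_mem _ (ih a (by rw [hms]; exact List.mem_cons_self) x hx)
        · exact List.mem_cons_of_mem _ (ih p (by rw [hms]; exact List.mem_cons_of_mem _ hp) x hx)

theorem countA_eq_countB (m : Nat) :
    (((PySem.Chars.splitOn (Nat.toDigits 10 m) ['0']).map String.ofList).foldl
        (fun cnt e => if PySem.Str.strIsdigit e then cnt + 1 else cnt) (0 : Int))
      = runLoop (m : Int) 0 false := by
  rw [runLoop_eq m 0 false, List.foldl_map]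
  have hdig : ∀ c ∈ Nat.toDigits 10 m, PySem.Chars.isdigit c = true := by
    intro c hc
    have := Nat.isDigit_of_mem_toDigits (by norm_num) (by norm_num) hc
    simp only [PySem.Chars.isdigit, Char.isDigit] at this ⊢
    simpa [Char.le_def] using this
  have hsimp : ∀ e, PySem.Str.strIsdigit (String.ofList e)
      = PySem.Chars.strIsdigit e := by
    intro e; rw [PySem.Str.strIsdigit_eq]; simp
  simp only [hsimp]
  rw [foldl_if_count, splitOn_eq_mySplit]
  have hcongr : (mySplit (Nat.toDigits 10 m)).countP PySem.Chars.strIsdigit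
      = (mySplit (Nat.toDigits 10 m)).countP (fun e => !e.isEmpty) := by
    apply List.countP_congr
    intro p hp
    simp only [PySem.Chars.strIsdigit, Bool.and_eq_true, List.all_eq_true]
    constructor
    · rintro ⟨h1, _⟩; simpa using h1
    · intro h1
      refine ⟨by simpa using h1, fun x hx => hdig x (mem_mySplit _ p hp x hx)⟩
  rw [hcongr, countNE_mySplit, runsF_toDigits, zero_add]

theorem transformGo_nonneg (fuel : Nat) : ∀ (n k res i : Int),
    0 ≤ res → 0 ≤ i → (n ≤ 0 ∨ 2 ≤ k) → 0 ≤ transformGo fuel n k res i := by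
  induction fuel with
  | zero => intro n k res i h1 _ _; simpa [transformGo] using h1
  | succ fuel ih =>
    intro n k res i h1 h2 hp
    simp only [transformGo]
    split
    · rename_i hn
      have hk : 2 ≤ k := by rcases hp with h | h <;> omega
      exact ih _ _ _ _
        (by have := PySem.Int.mod_nonneg n (b := k) (by omega); positivity)
        (by positivity) (Or.inr hk)
    · exact h1

theorem transformRadix_nonneg (n k : Int) (hp : n ≤ 0 ∨ 2 ≤ k) :
    0 ≤ transformRadix n k :=
  transformGo_nonneg _ n k 0 1 le_rfl (by norm_num) hp

theorem toList_toStr_ofNat (m : Nat) :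
    (PySem.Int.toStr ((m : Nat) : Int)).toList = Nat.toDigits 10 m := by
  rw [PySem.Int.toList_toStr, PySem.Int.toChars]
  rw [if_neg (by exact_mod_cast Int.not_lt.mpr (Int.natCast_nonneg m))]
  simp

theorem split?_toStr (m : Nat) :
    PySem.Str.split? (PySem.Int.toStr ((m : Nat) : Int)) "0"
      = some ((PySem.Chars.splitOn (Nat.toDigits 10 m) ['0']).map String.ofList) := by
  rw [PySem.Str.split?, PySem.Chars.split?]
  rw [show ("0" : String).toList = ['0'] from rfl]
  rw [if_neg (by simp)]
  rw [toList_toStr_ofNat]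
  rfl

-- ===== VERDICT (by name: the statement is the Claim_ definition above) =====
theorem solution_spec : Claim_equal_solution := by
  unfold Claim_equal_solution
  intro n k _ hpre
  unfold Spec_solution solution solution_alt
  obtain ⟨mm, hmm⟩ := Int.eq_ofNat_of_zero_le (transformRadix_nonneg n k hpre)
  rw [hmm]
  simp only [split?_toStr mm, Option.getD_some]
  simpa using countA_eq_countB mm
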